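-- pv_equiv track=rewrite | github.com/CCreek96/ut_coursework | CS303E/recursion3.py | groupNoAdj
-- ===== SOURCE A (Python) =====
-- def groupNoAdj(start, nums, target):
--   if (len (nums) == start):
--     return (target == 0)
--   elif (len (nums) > start + 1):
--     if (nums [start] <= target):
--       return groupNoAdj (start + 2, nums, target - nums [start]) or groupNoAdj (start + 1, nums, target)
--     else:
--       return groupNoAdj (start + 1, nums, target)
--   else:
--     return groupNoAdj (start + 1, nums, target - nums [start]) or groupNoAdj (start + 1, nums, target)
-- ===== SOURCE B (Python) =====
-- def groupNoAdj(start, nums, target):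
--     n = len(nums)
--     cur = {target}   # remaining targets for positions at index i
--     nxt = set()      # remaining targets pending for index i + 1
--     i = start
--     while i < n:
--         v = nums[i]
--         skip = set()
--         inc = set()
--         for t in cur:
--             if n > i + 1:
--                 if v <= t:
--                     inc.add(t - v)
--                 skip.add(t)
--             else:
--                 skip.add(t - v)
--                 skip.add(t)
--         cur = skip | nxt
--         nxt = inc
--         i += 1
--     return 0 in cur
-- ===== Notes on version B (the rewrite author's own statement) =====
-- stated objective: alternative
-- what changed: A's branching recursion over (position, remaining target) is replaced by a single iterative forward pass carrying two frontier sets of remaining targets, so identical residual targets are merged (evaluated once) instead of being explored once per path; A can still win when its or-short-circuit finds a hit early.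
import Mathlib
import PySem

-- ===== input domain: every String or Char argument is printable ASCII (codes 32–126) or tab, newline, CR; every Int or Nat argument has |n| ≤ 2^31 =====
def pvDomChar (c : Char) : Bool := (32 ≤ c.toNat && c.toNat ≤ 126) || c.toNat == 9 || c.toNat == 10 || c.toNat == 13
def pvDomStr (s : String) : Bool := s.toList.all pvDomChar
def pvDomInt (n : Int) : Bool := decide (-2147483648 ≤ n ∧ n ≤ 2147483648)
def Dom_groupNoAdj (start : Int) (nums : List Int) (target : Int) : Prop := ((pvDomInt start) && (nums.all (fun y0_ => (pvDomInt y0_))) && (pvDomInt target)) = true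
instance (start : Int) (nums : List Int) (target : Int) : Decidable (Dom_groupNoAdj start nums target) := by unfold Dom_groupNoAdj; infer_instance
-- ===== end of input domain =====

-- B replaces A's exponential branching recursion by a single forward pass that
-- propagates the set of remaining targets per position (objective: alternative).

-- ===== PORT A =====
def groupNoAdj (start : Int) (nums : List Int) (target : Int) : Bool :=
  if (nums.length : Int) = start then decide (target = 0)
  else if (nums.length : Int) > start + 1 then
    match h : PySem.List.pyGet? nums start with
    | none => false   -- Python raises IndexError here; outside Pre_
    | some v =>
      if v ≤ target then
        groupNoAdj (start + 2) nums (target - v) || groupNoAdj (start + 1) nums target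
      else
        groupNoAdj (start + 1) nums target
  else
    match h : PySem.List.pyGet? nums start with
    | none => false   -- Python raises IndexError here; outside Pre_
    | some v => groupNoAdj (start + 1) nums (target - v) || groupNoAdj (start + 1) nums target
termination_by ((nums.length : Int) + 1 - start).toNat
decreasing_by
  all_goals first
  | omega
  | (-- last-element branch: the valid index forces start = nums.length - 1
     have hin : PySem.Raise.InRange nums.length start := by
       by_contra hc
       rw [← PySem.List.pyGet?_eq_none_iff] at hc
       simp [hc] at h
     simp [PySem.Raise.InRange] at hin
     omega)

-- ===== PORT B =====
-- inner 'for t in cur' loop of Source B: builds (skip, inc) from cur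
def pvStepSets (nums : List Int) (i v : Int) (cur : List Int) : List Int × List Int :=
  cur.foldl
    (fun p t =>
      if (nums.length : Int) > i + 1 then
        (PySem.Set.add p.1 t, if v ≤ t then PySem.Set.add p.2 (t - v) else p.2)
      else
        (PySem.Set.add (PySem.Set.add p.1 (t - v)) t, p.2))
    (PySem.Set.empty, PySem.Set.empty)

-- the 'while i < n' loop of Source B, state (cur, nxt)
def pvAltLoop (nums : List Int) (i : Int) (cur nxt : List Int) : Bool :=
  if i < (nums.length : Int) then
    match PySem.List.pyGet? nums i with
    | none => false   -- Python raises IndexError here; outside Pre_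
    | some v =>
      pvAltLoop nums (i + 1) (PySem.Set.union (pvStepSets nums i v cur).1 nxt)
        (pvStepSets nums i v cur).2
  else
    PySem.Set.contains cur 0
termination_by ((nums.length : Int) - i).toNat
decreasing_by omega

def groupNoAdj_alt (start : Int) (nums : List Int) (target : Int) : Bool :=
  pvAltLoop nums start (PySem.Set.add PySem.Set.empty target) PySem.Set.empty

-- ===== PRECONDITION & SPEC =====
-- Pre_ excludes exactly the inputs where Python A raises IndexError (start past
-- either end of the list); A returns on every input satisfying Pre_.
def Pre_groupNoAdj (start : Int) (nums : List Int) (target : Int) : Prop :=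
  -(nums.length : Int) ≤ start ∧ start ≤ (nums.length : Int)
instance (start : Int) (nums : List Int) (target : Int) : Decidable (Pre_groupNoAdj start nums target) := by unfold Pre_groupNoAdj; infer_instance
def pvWitness_groupNoAdj : Int × List Int × Int := (0, [2, 3, 5], 7)

def Spec_groupNoAdj (start : Int) (nums : List Int) (target : Int) (out : Bool) : Prop := out = groupNoAdj_alt start nums target
instance (start : Int) (nums : List Int) (target : Int) (out : Bool) : Decidable (Spec_groupNoAdj start nums target out) := by unfold Spec_groupNoAdj; infer_instance

-- ===== CLAIM (what is proved, stated in full; the proofs are below) =====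
def Claim_equal_groupNoAdj : Prop := ∀ (start : Int) (nums : List Int) (target : Int), Dom_groupNoAdj start nums target → Pre_groupNoAdj start nums target → Spec_groupNoAdj start nums target (groupNoAdj start nums target)
-- ===== LEMMAS AND PROOFS =====

-- unfolding lemmas for port A
theorem pvA_base (nums : List Int) (t : Int) :
    groupNoAdj ((nums.length : Int)) nums t = decide (t = 0) := by
  rw [groupNoAdj]; simp

theorem pvA_mid (nums : List Int) (i v : Int) (hv : PySem.List.pyGet? nums i = some v)
    (hlt : (nums.length : Int) > i + 1) (t : Int) :
    groupNoAdj i nums t =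
      (if v ≤ t then groupNoAdj (i + 2) nums (t - v) || groupNoAdj (i + 1) nums t
       else groupNoAdj (i + 1) nums t) := by
  have hne : ¬ ((nums.length : Int) = i) := by omega
  rw [groupNoAdj]; simp only [if_neg hne, if_pos hlt]
  split
  · next h => simp [hv] at h
  · next v' h => rw [hv] at h; injection h with h; subst h; rfl

theorem pvA_last (nums : List Int) (i v : Int) (hv : PySem.List.pyGet? nums i = some v)
    (hne : ¬ ((nums.length : Int) = i)) (hge : ¬ ((nums.length : Int) > i + 1)) (t : Int) :
    groupNoAdj i nums t = (groupNoAdj (i + 1) nums (t - v) || groupNoAdj (i + 1) nums t) := by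
  rw [groupNoAdj]; simp only [if_neg hne, if_neg hge]
  split
  · next h => simp [hv] at h
  · next v' h => rw [hv] at h; injection h with h; subst h; rfl

-- membership in the inner loop's accumulators, middle-position body
theorem pvFoldMidAux (v x : Int) (cur : List Int) : ∀ (s c : List Int),
    (x ∈ (cur.foldl (fun p t =>
        ((PySem.Set.add p.1 t : List Int),
         if v ≤ t then (PySem.Set.add p.2 (t - v) : List Int) else p.2)) (s, c)).1
      ↔ x ∈ s ∨ x ∈ cur) ∧
    (x ∈ (cur.foldl (fun p t =>
        ((PySem.Set.add p.1 t : List Int),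
         if v ≤ t then (PySem.Set.add p.2 (t - v) : List Int) else p.2)) (s, c)).2
      ↔ x ∈ c ∨ ∃ t ∈ cur, v ≤ t ∧ x = t - v) := by
  induction cur with
  | nil => intro s c; simp
  | cons t0 rest ih =>
    intro s c
    simp only [List.foldl_cons]
    rcases ih (PySem.Set.add s t0) (if v ≤ t0 then PySem.Set.add c (t0 - v) else c) with ⟨h1, h2⟩
    constructor
    · rw [h1]; simp [PySem.Set.mem_add]; tauto
    · rw [h2]
      by_cases hvt : v ≤ t0 <;> simp [hvt, PySem.Set.mem_add] <;> aesop

-- membership in the inner loop's accumulators, last-position body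
theorem pvFoldLastAux (v x : Int) (cur : List Int) : ∀ (s c : List Int),
    (x ∈ (cur.foldl (fun p t =>
        ((PySem.Set.add (PySem.Set.add p.1 (t - v)) t : List Int), p.2)) (s, c)).1
      ↔ x ∈ s ∨ ∃ t ∈ cur, x = t - v ∨ x = t) ∧
    ((cur.foldl (fun p t =>
        ((PySem.Set.add (PySem.Set.add p.1 (t - v)) t : List Int), p.2)) (s, c)).2 = c) := by
  induction cur with
  | nil => intro s c; simp
  | cons t0 rest ih =>
    intro s c
    simp only [List.foldl_cons]
    rcases ih (PySem.Set.add (PySem.Set.add s (t0 - v)) t0) c with ⟨h1, h2⟩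
    refine ⟨?_, h2⟩
    rw [h1]; simp [PySem.Set.mem_add]; aesop

-- characterisation of "some remaining target in cur succeeds at i", middle position
theorem pvExists_mid (nums : List Int) (i v : Int) (hv : PySem.List.pyGet? nums i = some v)
    (hlt : (nums.length : Int) > i + 1) (cur : List Int) :
    (∃ t ∈ cur, groupNoAdj i nums t = true) ↔
      ((∃ t ∈ cur, groupNoAdj (i + 1) nums t = true) ∨
       (∃ t ∈ cur, v ≤ t ∧ groupNoAdj (i + 2) nums (t - v) = true)) := by
  constructor
  · rintro ⟨t, ht, hgt⟩
    rw [pvA_mid nums i v hv hlt t] at hgt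
    by_cases hvt : v ≤ t
    · rw [if_pos hvt] at hgt
      rcases Bool.or_eq_true_iff.mp hgt with h | h
      · exact Or.inr ⟨t, ht, hvt, h⟩
      · exact Or.inl ⟨t, ht, h⟩
    · rw [if_neg hvt] at hgt
      exact Or.inl ⟨t, ht, hgt⟩
  · rintro (⟨t, ht, h⟩ | ⟨t, ht, hvt, h⟩) <;>
      refine ⟨t, ht, ?_⟩ <;> rw [pvA_mid nums i v hv hlt t]
    · split_ifs <;> simp [h]
    · rw [if_pos hvt]; simp [h]

-- characterisation of "some remaining target in cur succeeds at i", last position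
theorem pvExists_last (nums : List Int) (i v : Int) (hv : PySem.List.pyGet? nums i = some v)
    (hne : ¬ ((nums.length : Int) = i)) (hge : ¬ ((nums.length : Int) > i + 1)) (cur : List Int) :
    (∃ t ∈ cur, groupNoAdj i nums t = true) ↔
      (∃ t ∈ cur, groupNoAdj (i + 1) nums (t - v) = true ∨ groupNoAdj (i + 1) nums t = true) := by
  constructor
  · rintro ⟨t, ht, hgt⟩
    rw [pvA_last nums i v hv hne hge t] at hgt
    exact ⟨t, ht, Bool.or_eq_true_iff.mp hgt⟩
  · rintro ⟨t, ht, h⟩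
    refine ⟨t, ht, ?_⟩
    rw [pvA_last nums i v hv hne hge t]
    rcases h with h | h <;> simp [h]

-- loop invariant: pvAltLoop answers "some pending state succeeds"
theorem pvLoop_eq (nums : List Int) : ∀ (k : Nat) (i : Int) (cur nxt : List Int),
    ((nums.length : Int) - i).toNat = k →
    -(nums.length : Int) ≤ i → i ≤ (nums.length : Int) →
    (i = (nums.length : Int) → nxt = []) →
    pvAltLoop nums i cur nxt =
      (cur.any (fun t => groupNoAdj i nums t) ||
       nxt.any (fun t => groupNoAdj (i + 1) nums t)) := by
  intro k
  induction k using Nat.strong_induction_on with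
  | _ k ih =>
    intro i cur nxt hk hlo hhi hnxt
    rw [pvAltLoop]
    by_cases hin : i < (nums.length : Int)
    case neg =>
      have hi : i = (nums.length : Int) := by omega
      rw [if_neg hin]
      subst hi
      rw [hnxt rfl]
      rw [Bool.eq_iff_iff]
      simp [List.any_eq_true, pvA_base, PySem.Set.contains_iff]
    case pos =>
      rw [if_pos hin]
      obtain ⟨v, hv⟩ : ∃ v, PySem.List.pyGet? nums i = some v := by
        cases hvv : PySem.List.pyGet? nums i with
        | none =>
          rw [PySem.List.pyGet?_eq_none_iff] at hvv
          simp [PySem.Raise.InRange] at hvv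
          omega
        | some v => exact ⟨v, rfl⟩
      simp only [hv]
      by_cases hbig : (nums.length : Int) > i + 1
      case pos =>
        rw [ih (((nums.length : Int) - (i + 1)).toNat) (by omega) (i + 1) _ _ rfl
            (by omega) (by omega) (by intro h; omega)]
        rw [Bool.eq_iff_iff]
        have h12 : i + 1 + 1 = i + 2 := by ring
        simp only [Bool.or_eq_true, List.any_eq_true, PySem.Set.mem_union, pvStepSets,
          if_pos hbig, h12]
        have hfst := fun x => (pvFoldMidAux v x cur PySem.Set.empty PySem.Set.empty).1
        have hsnd := fun x => (pvFoldMidAux v x cur PySem.Set.empty PySem.Set.empty).2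
        simp only [PySem.Set.empty] at hfst hsnd
        rw [pvExists_mid nums i v hv hbig cur]
        constructor
        · rintro (⟨t, htm, hf⟩ | ⟨x, hxm, hf⟩)
          · rcases htm with htm | htm
            · rcases (hfst t).mp htm with h | h
              · simp at h
              · exact Or.inl (Or.inl ⟨t, h, hf⟩)
            · exact Or.inr ⟨t, htm, hf⟩
          · rcases (hsnd x).mp hxm with h | ⟨t, ht, hvt, hx⟩
            · simp at h
            · exact Or.inl (Or.inr ⟨t, ht, hvt, by rwa [← hx]⟩)
        · rintro ((⟨t, ht, hf⟩ | ⟨t, ht, hvt, hf⟩) | ⟨t, ht, hf⟩)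
          · exact Or.inl ⟨t, Or.inl ((hfst t).mpr (Or.inr ht)), hf⟩
          · exact Or.inr ⟨t - v, (hsnd (t - v)).mpr (Or.inr ⟨t, ht, hvt, rfl⟩), hf⟩
          · exact Or.inl ⟨t, Or.inr ht, hf⟩
      case neg =>
        have hsnd : (pvStepSets nums i v cur).2 = ([] : List Int) := by
          simp only [pvStepSets, if_neg hbig]
          exact (pvFoldLastAux v 0 cur PySem.Set.empty PySem.Set.empty).2
        rw [ih (((nums.length : Int) - (i + 1)).toNat) (by omega) (i + 1) _ _ rfl
            (by omega) (by omega) (by intro _; exact hsnd)]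
        rw [Bool.eq_iff_iff]
        rw [hsnd]
        simp only [Bool.or_eq_true, List.any_eq_true, PySem.Set.mem_union, List.not_mem_nil]
        have hfst' : ∀ x, x ∈ (pvStepSets nums i v cur).1 ↔ ∃ t ∈ cur, x = t - v ∨ x = t := by
          intro x
          simp only [pvStepSets, if_neg hbig]
          rw [(pvFoldLastAux v x cur PySem.Set.empty PySem.Set.empty).1]
          simp [PySem.Set.empty]
        rw [pvExists_last nums i v hv (by omega) hbig cur]
        constructor
        · rintro (⟨t, htm, hf⟩ | ⟨x, hxm, _⟩)
          · rcases htm with htm | htm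
            · rcases (hfst' t).mp htm with ⟨t0, ht0, h | h⟩
              · exact Or.inl ⟨t0, ht0, Or.inl (by rwa [← h])⟩
              · exact Or.inl ⟨t0, ht0, Or.inr (by rwa [← h])⟩
            · exact Or.inr ⟨t, htm, hf⟩
          · exact absurd hxm (by simp)
        · rintro (⟨t, ht, h | h⟩ | ⟨t, ht, hf⟩)
          · exact Or.inl ⟨t - v, Or.inl ((hfst' (t - v)).mpr ⟨t, ht, Or.inl rfl⟩), h⟩
          · exact Or.inl ⟨t, Or.inl ((hfst' t).mpr ⟨t, ht, Or.inr rfl⟩), h⟩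
          · exact Or.inl ⟨t, Or.inr ht, hf⟩

-- ===== VERDICT (by name: the statement is the Claim_ definition above) =====
theorem groupNoAdj_spec : Claim_equal_groupNoAdj := by
  intro start nums target _ hpre
  rcases hpre with ⟨h1, h2⟩
  unfold Spec_groupNoAdj groupNoAdj_alt
  simp only [PySem.Set.empty]
  have hcur : (PySem.Set.add ([] : List Int) target) = [target] := by
    simp [PySem.Set.add_eq_ite]
  rw [hcur]
  rw [pvLoop_eq nums (((nums.length : Int) - start).toNat) start [target] [] rfl h1 h2
      (by intro _; rfl)]
  simp
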